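-- pv_equiv track=rewrite | github.com/katarinagresova/GenBenchQC | src/genData/utils/statistics.py | get_dinucleotide_content_summary
-- ===== SOURCE A (Python) =====
-- def get_dinucleotide_content_summary(content_dict, unique_bases):
--     """Helper function to compute summary statistics for dinucleotide content"""
--     summary = {}
--     dinucleotides = [n1 + n2 for n1 in unique_bases for n2 in unique_bases]
--     for dinucleotide in dinucleotides:
--         values = [seq_dict.get(dinucleotide, 0) for seq_dict in content_dict.values()]
--         values.sort()
--         n = len(values)
--         summary[dinucleotide] = {
--             'min': min(values),
--             'q1': values[n//4],
--             'median': values[n//2],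
--             'q3': values[n*3//4],
--             'max': max(values)
--         }
--     return summary
-- ===== SOURCE B (Python) =====
-- from bisect import bisect_left
--
-- def get_dinucleotide_content_summary(content_dict, unique_bases):
--     """Sparse one-pass rewrite: walk each sequence's own items once, collecting
--     only the values that are actually present per dinucleotide; the absent
--     entries form a virtual block of zeros that is never materialised, and each
--     quantile is read from the sorted present values with bisect-based index
--     arithmetic."""
--     dinucleotides = [n1 + n2 for n1 in unique_bases for n2 in unique_bases]
--     columns = {d: [] for d in dinucleotides}
--     for seq_dict in content_dict.values():
--         for d, v in seq_dict.items():
--             if d in columns: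
--                 columns[d].append(v)
--     n = len(content_dict)
--     summary = {}
--     for d, col in columns.items():
--         s = sorted(col)
--         z = n - len(s)                # sequences without this dinucleotide -> zeros
--         k = bisect_left(s, 0)         # the zero block sits at positions k .. k+z-1
--         def pick(i):
--             if i < k:
--                 return s[i]
--             if i < k + z:
--                 return 0
--             return s[i - z]
--         summary[d] = {
--             'min': pick(0),
--             'q1': pick(n//4),
--             'median': pick(n//2),
--             'q3': pick(n*3//4),
--             'max': pick(n-1)
--         }
--     return summary
-- ===== Notes on version B (the rewrite author's own statement) =====
-- stated objective: faster
-- what changed: B walks each sequence's own items once into per-dinucleotide lists of the present values (instead of rescanning content_dict and re-looking-up every dinucleotide per sequence) and reads each quantile off the sorted present values with bisect index arithmetic, treating the absent entries as a virtual zero block that is never built or sorted.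
import Mathlib
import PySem

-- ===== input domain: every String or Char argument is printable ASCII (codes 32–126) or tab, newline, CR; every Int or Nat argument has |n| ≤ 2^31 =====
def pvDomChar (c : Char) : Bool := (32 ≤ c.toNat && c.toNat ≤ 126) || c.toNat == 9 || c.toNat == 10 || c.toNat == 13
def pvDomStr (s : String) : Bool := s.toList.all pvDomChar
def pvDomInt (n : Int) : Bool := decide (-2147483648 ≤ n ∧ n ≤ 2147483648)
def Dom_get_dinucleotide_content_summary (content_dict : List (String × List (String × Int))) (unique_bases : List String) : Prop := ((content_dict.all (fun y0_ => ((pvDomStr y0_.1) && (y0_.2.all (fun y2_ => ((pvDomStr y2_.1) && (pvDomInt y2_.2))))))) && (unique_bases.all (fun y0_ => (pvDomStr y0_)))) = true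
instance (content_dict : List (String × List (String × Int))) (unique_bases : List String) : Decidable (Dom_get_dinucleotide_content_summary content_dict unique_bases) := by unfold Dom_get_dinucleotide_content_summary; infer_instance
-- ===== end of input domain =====

-- B walks each sequence's items once into per-dinucleotide columns of the PRESENT values and reads each
-- quantile from the sorted column via bisect, treating the absent entries as a virtual zero block;
-- objective: faster (no per-dinucleotide rescan of content_dict, zeros never materialised or sorted).

-- ===== PORT A =====
def get_dinucleotide_content_summary (content_dict : List (String × List (String × Int))) (unique_bases : List String) : List (String × List (String × Int)) :=
  let dinucleotides := unique_bases.flatMap (fun n1 => unique_bases.map (fun n2 => n1 ++ n2))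
  let summary : PySem.Dict String (List (String × Int)) :=
    dinucleotides.foldl (fun summary dinucleotide =>
      -- values = [seq_dict.get(dinucleotide, 0) for seq_dict in content_dict.values()]; values.sort()
      let values := PySem.List.sorted ((PySem.Dict.ofList content_dict).values.map
                      (fun seq_dict => (PySem.Dict.ofList seq_dict).getD dinucleotide 0)) (fun x => x) false
      let n : Int := values.length
      -- min()/max() of an empty list and values[i] of an empty list raise in Python: Pre_ excludes that,
      -- so the .getD 0 / pyGetD defaults below are never the returned value on admitted inputs
      summary.insert dinucleotide
        [("min", (PySem.List.min? values (fun x => x)).getD 0),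
         ("q1", PySem.List.pyGetD values (PySem.Int.floordiv n 4) 0),
         ("median", PySem.List.pyGetD values (PySem.Int.floordiv n 2) 0),
         ("q3", PySem.List.pyGetD values (PySem.Int.floordiv (n * 3) 4) 0),
         ("max", (PySem.List.max? values (fun x => x)).getD 0)]) PySem.Dict.empty
  summary.items

-- ===== PORT B =====
def get_dinucleotide_content_summary_alt (content_dict : List (String × List (String × Int))) (unique_bases : List String) : List (String × List (String × Int)) :=
  let dinucleotides := unique_bases.flatMap (fun n1 => unique_bases.map (fun n2 => n1 ++ n2))
  -- columns = {d: [] for d in dinucleotides}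
  let columns : PySem.Dict String (List Int) :=
    dinucleotides.foldl (fun c d => c.insert d []) PySem.Dict.empty
  -- for seq_dict in content_dict.values(): for d, v in seq_dict.items(): if d in columns: columns[d].append(v)
  let columns := (PySem.Dict.ofList content_dict).values.foldl (fun cols seq_dict =>
      (PySem.Dict.ofList seq_dict).items.foldl (fun c p =>
        if c.contains p.1 then c.modify p.1 [] (fun l => l ++ [p.2]) else c) cols) columns
  -- n = len(content_dict)
  let n : Int := (PySem.Dict.ofList content_dict).size
  let summary : PySem.Dict String (List (String × Int)) :=
    columns.items.foldl (fun su p =>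
      let s := PySem.List.sorted p.2 (fun x => x) false
      let z : Int := n - s.length
      let k : Int := PySem.List.bisectLeft s 0
      -- pick(i): s[i] below the zero block, 0 inside it, s[i-z] above it
      -- (s[i] raises on an empty full column in Python: Pre_ excludes that case)
      let pick : Int → Int := fun i =>
        if i < k then PySem.List.pyGetD s i 0
        else if i < k + z then 0
        else PySem.List.pyGetD s (i - z) 0
      su.insert p.1
        [("min", pick 0),
         ("q1", pick (PySem.Int.floordiv n 4)),
         ("median", pick (PySem.Int.floordiv n 2)),
         ("q3", pick (PySem.Int.floordiv (n * 3) 4)),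
         ("max", pick (n - 1))]) PySem.Dict.empty
  summary.items

-- ===== PRECONDITION & SPEC =====
-- A raises (min()/indexing of an empty values list) exactly when there is at least one dinucleotide
-- but content_dict is empty; Pre_ excludes only that case.
def Pre_get_dinucleotide_content_summary (content_dict : List (String × List (String × Int))) (unique_bases : List String) : Prop :=
  unique_bases = [] ∨ content_dict ≠ []
instance (content_dict : List (String × List (String × Int))) (unique_bases : List String) : Decidable (Pre_get_dinucleotide_content_summary content_dict unique_bases) := by unfold Pre_get_dinucleotide_content_summary; infer_instance

def pvWitness_get_dinucleotide_content_summary : (List (String × List (String × Int))) × List String :=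
  ([("s1", [("AA", 3), ("AC", 1)]), ("s2", [("AA", 2)])], ["A", "C"])

def Spec_get_dinucleotide_content_summary (content_dict : List (String × List (String × Int))) (unique_bases : List String) (out : List (String × List (String × Int))) : Prop := out = get_dinucleotide_content_summary_alt content_dict unique_bases
instance (content_dict : List (String × List (String × Int))) (unique_bases : List String) (out : List (String × List (String × Int))) : Decidable (Spec_get_dinucleotide_content_summary content_dict unique_bases out) := by unfold Spec_get_dinucleotide_content_summary; infer_instance

-- ===== CLAIM (what is proved, stated in full; the proofs are below) =====
def Claim_equal_get_dinucleotide_content_summary : Prop := ∀ (content_dict : List (String × List (String × Int))) (unique_bases : List String), Dom_get_dinucleotide_content_summary content_dict unique_bases → Pre_get_dinucleotide_content_summary content_dict unique_bases → Spec_get_dinucleotide_content_summary content_dict unique_bases (get_dinucleotide_content_summary content_dict unique_bases)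

-- ===== LEMMAS AND PROOFS =====

-- proof-only abbreviations
def pvDinucs (unique_bases : List String) : List String :=
  unique_bases.flatMap (fun n1 => unique_bases.map (fun n2 => n1 ++ n2))

def pvVs (content_dict : List (String × List (String × Int))) : List (List (String × Int)) :=
  (PySem.Dict.ofList content_dict).values

def pvFull (content_dict : List (String × List (String × Int))) (k : String) : List Int :=
  (pvVs content_dict).map (fun seq_dict => (PySem.Dict.ofList seq_dict).getD k 0)

def pvPresent (content_dict : List (String × List (String × Int))) (k : String) : List Int :=
  (pvVs content_dict).flatMap (fun seq_dict => ((PySem.Dict.ofList seq_dict).get? k).toList)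

def pvValA (content_dict : List (String × List (String × Int))) (k : String) : List (String × Int) :=
  let values := PySem.List.sorted (pvFull content_dict k) (fun x => x) false
  let n : Int := values.length
  [("min", (PySem.List.min? values (fun x => x)).getD 0),
   ("q1", PySem.List.pyGetD values (PySem.Int.floordiv n 4) 0),
   ("median", PySem.List.pyGetD values (PySem.Int.floordiv n 2) 0),
   ("q3", PySem.List.pyGetD values (PySem.Int.floordiv (n * 3) 4) 0),
   ("max", (PySem.List.max? values (fun x => x)).getD 0)]

def pvStatsB (n : Int) (col : List Int) : List (String × Int) :=
  let s := PySem.List.sorted col (fun x => x) false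
  let z : Int := n - s.length
  let k : Int := PySem.List.bisectLeft s 0
  let pick : Int → Int := fun i =>
    if i < k then PySem.List.pyGetD s i 0
    else if i < k + z then 0
    else PySem.List.pyGetD s (i - z) 0
  [("min", pick 0),
   ("q1", pick (PySem.Int.floordiv n 4)),
   ("median", pick (PySem.Int.floordiv n 2)),
   ("q3", pick (PySem.Int.floordiv (n * 3) 4)),
   ("max", pick (n - 1))]

-- getD after a fold of inserts whose value depends only on the key: the last insert wins
theorem pv_getD_foldl_insert {β : Type} (l : List String) (v : String → β) (acc : PySem.Dict String β) (k : String) (dflt : β) :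
    (l.foldl (fun s d => s.insert d (v d)) acc).getD k dflt
      = if k ∈ l then v k else acc.getD k dflt := by
  induction l generalizing acc with
  | nil => simp
  | cons d t ih =>
    simp only [List.foldl_cons, ih, List.mem_cons, PySem.Dict.getD_insert]
    by_cases h1 : k ∈ t
    · simp [h1]
    · by_cases h2 : k = d <;> simp [h1, h2]

-- Set.ofList of a duplicate-free list is the list itself
theorem pv_foldl_add_nodup {α : Type} [BEq α] [LawfulBEq α] (t acc : List α)
    (hdisj : ∀ a ∈ t, a ∉ acc) (hnd : t.Nodup) : t.foldl PySem.Set.add acc = acc ++ t := by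
  induction t generalizing acc with
  | nil => simp
  | cons a t' ih =>
    simp only [List.nodup_cons] at hnd
    rw [List.foldl_cons, PySem.Set.add_of_not_mem (hdisj a (List.mem_cons_self ..)),
        ih (acc ++ [a]) ?_ hnd.2]
    · simp
    · intro b hb
      simp only [List.mem_append, List.mem_singleton]
      rintro (h | rfl)
      · exact hdisj b (List.mem_cons_of_mem _ hb) h
      · exact hnd.1 hb

theorem pv_ofList_nodup {α : Type} [BEq α] [LawfulBEq α] (xs : List α) (h : xs.Nodup) : PySem.Set.ofList xs = xs := by
  rw [PySem.Set.ofList_eq_foldl, pv_foldl_add_nodup xs [] (by simp) h]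
  simp

-- a fold of inserts (value a function of the key) from the empty dict, as items
theorem pv_items_foldl_insert (K : List String) (F : String → List (String × Int)) :
    ((K.foldl (fun s d => s.insert d (F d)) PySem.Dict.empty).items)
      = (PySem.Set.ofList K).map (fun k => (k, F k)) := by
  have hnd : ((K.foldl (fun s d => s.insert d (F d)) PySem.Dict.empty)).keys.Nodup :=
    PySem.Dict.nodup_keys_foldl_insert _ (fun _ d => F d) _ PySem.Dict.nodup_keys_empty
  rw [PySem.Dict.items_eq_map_keys _ hnd []]
  have hkeys : ((K.foldl (fun s d => s.insert d (F d)) PySem.Dict.empty)).keys = PySem.Set.ofList K := by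
    rw [PySem.Dict.keys_foldl_insert (f := fun _ d => F d)]
    rfl
  rw [hkeys]
  apply List.map_congr_left
  intro k hk
  rw [pv_getD_foldl_insert _ F, if_pos ((PySem.Set.mem_ofList _ _).mp hk)]

-- the guarded append pass never changes the key list
theorem pv_pass_keys (its : List (String × Int)) (c : PySem.Dict String (List Int)) :
    (its.foldl (fun c p => if c.contains p.1 then c.modify p.1 [] (fun l => l ++ [p.2]) else c) c).keys = c.keys := by
  induction its generalizing c with
  | nil => rfl
  | cons p t ih =>
    rw [List.foldl_cons, ih]
    by_cases hc : c.contains p.1 = true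
    · rw [if_pos hc, PySem.Dict.keys_modify, PySem.Dict.keys_insert_of_contains _ _ hc]
    · rw [if_neg hc]

-- the guarded append pass appends exactly the values carried by key k
theorem pv_pass_getD (its : List (String × Int)) (c : PySem.Dict String (List Int)) (k : String)
    (hmem : c.contains k = true) :
    (its.foldl (fun c p => if c.contains p.1 then c.modify p.1 [] (fun l => l ++ [p.2]) else c) c).getD k []
      = c.getD k [] ++ (its.filter (fun p => c.contains p.1 && p.1 == k)).map Prod.snd := by
  induction its generalizing c with
  | nil => simp
  | cons p t ih =>
    rw [List.foldl_cons]
    by_cases hc : c.contains p.1 = true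
    · rw [if_pos hc]
      have hcont : ∀ x, (c.modify p.1 [] (fun l => l ++ [p.2])).contains x = c.contains x := by
        intro x
        rw [PySem.Dict.contains_modify]
        by_cases hx : x = p.1
        · subst hx; simp [hc]
        · simp [hx]
      rw [ih _ (by rw [hcont]; exact hmem)]
      have hfilt : t.filter (fun q => (c.modify p.1 [] (fun l => l ++ [p.2])).contains q.1 && q.1 == k)
          = t.filter (fun q => c.contains q.1 && q.1 == k) :=
        List.filter_congr (fun q _ => by rw [hcont])
      rw [hfilt]
      by_cases hpk : p.1 = k
      · subst hpk
        rw [PySem.Dict.getD_modify, if_pos rfl]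
        simp [hc]
      · rw [PySem.Dict.getD_modify, if_neg (Ne.symm hpk)]
        simp [hpk]
    · rw [if_neg hc, ih _ hmem]
      have hpk : ¬ (p.1 == k) = true := by
        intro h
        exact hc (by rwa [eq_of_beq h])
      simp [hc]

-- in a dict (unique keys), filtering the items by a key yields that key's lookup
theorem pv_filter_items (its : List (String × Int)) (k : String) (hnd : (its.map Prod.fst).Nodup) :
    (its.filter (fun p => p.1 == k)).map Prod.snd = ((PySem.Dict.mk its).get? k).toList := by
  induction its with
  | nil => simp [PySem.Dict.get?]
  | cons p t ih =>
    simp only [List.map_cons, List.nodup_cons] at hnd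
    rcases p with ⟨d, v⟩
    rw [PySem.Dict.get?_mk_cons]
    by_cases hdk : (d == k) = true
    · have hdk' : d = k := eq_of_beq hdk
      subst hdk'
      have : t.filter (fun p => p.1 == d) = [] := by
        rw [List.filter_eq_nil_iff]
        intro q hq hbeq
        have : q.1 ∈ t.map Prod.fst := List.mem_map_of_mem hq
        rw [eq_of_beq hbeq] at this
        exact hnd.1 this
      simp [this]
    · rw [if_neg hdk]
      simp only [List.filter_cons, hdk, Bool.false_eq_true, if_false]
      exact ih hnd.2

-- the one-pass loop leaves, under each key of the columns dict, exactly the present values of that key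
theorem pv_columns_getD (vs : List (List (String × Int))) (c : PySem.Dict String (List Int)) (k : String)
    (hmem : c.contains k = true) :
    ((vs.foldl (fun cols sd =>
        (PySem.Dict.ofList sd).items.foldl (fun c p =>
          if c.contains p.1 then c.modify p.1 [] (fun l => l ++ [p.2]) else c) cols) c).getD k [])
      = c.getD k [] ++ vs.flatMap (fun sd => ((PySem.Dict.ofList sd).get? k).toList) := by
  induction vs generalizing c with
  | nil => simp
  | cons sd t ih =>
    rw [List.foldl_cons, ih _ ?_, pv_pass_getD _ _ _ hmem]
    · have hfilt : ((PySem.Dict.ofList sd).items.filter (fun p => c.contains p.1 && p.1 == k))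
          = ((PySem.Dict.ofList sd).items.filter (fun p => p.1 == k)) := by
        apply List.filter_congr
        intro p _
        by_cases hpk : (p.1 == k) = true
        · rw [hpk, eq_of_beq hpk]
          simp [hmem]
        · simp [hpk]
      have hmk : PySem.Dict.mk ((PySem.Dict.ofList sd).items) = PySem.Dict.ofList sd := rfl
      rw [hfilt, pv_filter_items _ _ ?_, hmk, List.flatMap_cons, List.append_assoc]
      rw [← PySem.Dict.keys]
      exact PySem.Dict.nodup_keys_ofList sd
    · rw [PySem.Dict.contains_iff_mem_keys, pv_pass_keys, ← PySem.Dict.contains_iff_mem_keys]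
      exact hmem

theorem pv_columns_keys (vs : List (List (String × Int))) (c : PySem.Dict String (List Int)) :
    (vs.foldl (fun cols sd =>
        (PySem.Dict.ofList sd).items.foldl (fun c p =>
          if c.contains p.1 then c.modify p.1 [] (fun l => l ++ [p.2]) else c) cols) c).keys = c.keys := by
  induction vs generalizing c with
  | nil => rfl
  | cons sd t ih => rw [List.foldl_cons, ih, pv_pass_keys]

-- the full column is a permutation of the present values plus one zero per absent sequence
theorem pv_full_perm (vs : List (List (String × Int))) (k : String) :
    (vs.map (fun sd => (PySem.Dict.ofList sd).getD k 0)).Perm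
      ((vs.flatMap (fun sd => ((PySem.Dict.ofList sd).get? k).toList))
        ++ List.replicate (vs.countP (fun sd => ((PySem.Dict.ofList sd).get? k).isNone)) 0) ∧
    (vs.flatMap (fun sd => ((PySem.Dict.ofList sd).get? k).toList)).length
      + vs.countP (fun sd => ((PySem.Dict.ofList sd).get? k).isNone) = vs.length := by
  induction vs with
  | nil => simp
  | cons sd t ih =>
    rcases ih with ⟨hperm, hlen⟩
    cases hsd : (PySem.Dict.ofList sd).get? k with
    | some v =>
      have hget : (PySem.Dict.ofList sd).getD k 0 = v := PySem.Dict.getD_of_get?_eq_some _ _ hsd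
      constructor
      · simp only [List.map_cons, List.flatMap_cons, List.countP_cons, hsd, Option.isNone_some,
          Option.toList_some, hget]
        simpa using hperm.cons v
      · simp only [List.flatMap_cons, List.countP_cons, hsd, Option.isNone_some, List.length_cons,
          List.length_append, Option.toList_some, List.length_cons]
        simp at hlen ⊢
        omega
    | none =>
      have hget : (PySem.Dict.ofList sd).getD k 0 = 0 := PySem.Dict.getD_of_get?_eq_none _ _ hsd
      constructor
      · simp only [List.map_cons, List.flatMap_cons, List.countP_cons, hsd, Option.isNone_none,
          Option.toList_none, hget, List.nil_append, if_true]
        refine (hperm.cons 0).trans ?_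
        rw [List.replicate_succ]
        exact List.perm_middle.symm
      · simp only [List.flatMap_cons, hsd, Option.toList_none, List.nil_append, List.countP_cons,
          Option.isNone_none, if_true, List.length_cons]
        have := List.countP_le_length (l := t) (p := fun sd => ((PySem.Dict.ofList sd).get? k).isNone)
        omega

theorem pv_foldl_max_last (t : List Int) : ∀ (x : Int), List.Pairwise (· ≤ ·) (x :: t) → List.foldl max x t = (x :: t).getLast (by simp) := by
  induction t with
  | nil => intro x _; simp
  | cons y t' ih =>
    intro x hp
    have hxy : x ≤ y := (List.pairwise_cons.mp hp).1 y (List.mem_cons_self ..)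
    have hp' : List.Pairwise (· ≤ ·) (y :: t') := (List.pairwise_cons.mp hp).2
    have : (x :: y :: t').getLast (by simp) = (y :: t').getLast (by simp) := by
      simp [List.getLast_cons]
    rw [this, List.foldl_cons, max_eq_right hxy]
    exact ih y hp'

theorem pv_foldl_min_head (t : List Int) (x : Int) (hp : List.Pairwise (· ≤ ·) (x :: t)) : List.foldl min x t = x := by
  apply le_antisymm (PySem.List.foldl_min_le t x).1
  rcases PySem.List.foldl_min_mem t x with h | h
  · omega
  · exact (List.pairwise_cons.mp hp).1 _ h

theorem pv_pyGetD_neg_one (l : List Int) (h : l ≠ []) (d : Int) : PySem.List.pyGetD l (-1) d = l.getLast h := by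
  have hn : 1 ≤ l.length := List.length_pos_iff.mpr h
  simp only [PySem.List.pyGetD, PySem.List.pyGet?, PySem.List.pyIdx?]
  have h1 : ¬ (0:Int) ≤ -1 := by norm_num
  have h2 : -(l.length : Int) ≤ -1 := by omega
  simp only [h1, if_false, h2, if_pos]
  have : (-(-1:Int)).toNat = 1 := by decide
  rw [this, Option.bind]
  simp [List.getLast_eq_getElem, List.getElem?_eq_getElem (by omega : l.length - 1 < l.length)]

-- min/max of a nonempty ascending sorted list are its first/last element
theorem pv_min_sorted (xs : List Int) (h : xs ≠ []) :
    (PySem.List.min? (PySem.List.sorted xs (fun x => x) false) (fun x => x)).getD 0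
      = PySem.List.pyGetD (PySem.List.sorted xs (fun x => x) false) 0 0 := by
  have hp := PySem.List.sorted_pairwise xs (fun x => x)
  have hne : PySem.List.sorted xs (fun x => x) false ≠ [] := by
    rw [Ne, PySem.List.sorted_eq_nil_iff]; exact h
  obtain ⟨a, t, hat⟩ := List.exists_cons_of_ne_nil hne
  rw [hat] at hp ⊢
  rw [PySem.List.min?_id_cons, Option.getD_some, pv_foldl_min_head t a hp]
  simp [PySem.List.pyGetD, PySem.List.pyGet?, PySem.List.pyIdx?]

theorem pv_max_cons (a : Int) (t : List Int) (hp : List.Pairwise (· ≤ ·) (a :: t)) :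
    (PySem.List.max? (a :: t) (fun x => x)).getD 0 = PySem.List.pyGetD (a :: t) (-1) 0 := by
  rw [pv_pyGetD_neg_one _ (by simp), PySem.List.max?_id_cons, Option.getD_some]
  exact pv_foldl_max_last t a hp

theorem pv_max_sorted (xs : List Int) (h : xs ≠ []) :
    (PySem.List.max? (PySem.List.sorted xs (fun x => x) false) (fun x => x)).getD 0
      = PySem.List.pyGetD (PySem.List.sorted xs (fun x => x) false) (-1) 0 := by
  have hp := PySem.List.sorted_pairwise xs (fun x => x)
  have hne : PySem.List.sorted xs (fun x => x) false ≠ [] := by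
    rw [Ne, PySem.List.sorted_eq_nil_iff]; exact h
  obtain ⟨a, t, hat⟩ := List.exists_cons_of_ne_nil hne
  rw [hat] at hp ⊢
  exact pv_max_cons a t hp

-- the -1 index is the (length-1) index on a nonempty list
theorem pv_pyGetD_neg_one_eq (l : List Int) (h : l ≠ []) (d : Int) :
    PySem.List.pyGetD l (-1) d = PySem.List.pyGetD l ((l.length : Int) - 1) d := by
  have hn : 1 ≤ l.length := List.length_pos_iff.mpr h
  rw [pv_pyGetD_neg_one l h d, PySem.List.pyGetD_eq_getElem l d (by omega) (by omega),
      List.getLast_eq_getElem]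
  congr 1
  omega

-- the sorted full column is the sorted present column with the zero block spliced in at bisect_left
theorem pv_sorted_full (cd : List (String × List (String × Int))) (k : String) :
    PySem.List.sorted (pvFull cd k) (fun x => x) false
      = (PySem.List.sorted (pvPresent cd k) (fun x => x) false).take
          (PySem.List.bisectLeft (PySem.List.sorted (pvPresent cd k) (fun x => x) false) 0)
        ++ List.replicate ((pvVs cd).length - (pvPresent cd k).length) 0
        ++ (PySem.List.sorted (pvPresent cd k) (fun x => x) false).drop
          (PySem.List.bisectLeft (PySem.List.sorted (pvPresent cd k) (fun x => x) false) 0) := by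
  obtain ⟨hperm, hlen⟩ := pv_full_perm (pvVs cd) k
  set s := PySem.List.sorted (pvPresent cd k) (fun x => x) false with hs
  have hsp : s.Perm (pvPresent cd k) := PySem.List.sorted_perm _ _ _
  have hslen : s.length = (pvPresent cd k).length := hsp.length_eq
  have hpairs : List.Pairwise (· ≤ ·) s := PySem.List.sorted_pairwise _ _
  obtain ⟨hk0, hbelow, habove⟩ := PySem.List.bisectLeft_spec s 0 hpairs
  set k0 := PySem.List.bisectLeft s 0 with hk0def
  set zN := (pvVs cd).length - (pvPresent cd k).length with hz
  have hzc : zN = (pvVs cd).countP (fun sd => ((PySem.Dict.ofList sd).get? k).isNone) := by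
    have : (pvPresent cd k).length
        = ((pvVs cd).flatMap (fun sd => ((PySem.Dict.ofList sd).get? k).toList)).length := rfl
    omega
  apply List.Perm.eq_of_pairwise (le := (· ≤ ·)) (fun a b _ _ => le_antisymm)
  · exact PySem.List.sorted_pairwise _ _
  · -- Pairwise of the spliced list
    have htake : ∀ a ∈ s.take k0, a < 0 := by
      intro a ha
      obtain ⟨j, hj, hja⟩ := List.mem_iff_getElem.mp ha
      have hjlt : j < min k0 s.length := by
        have := List.length_take (i := k0) (l := s); omega
      have heq : s[j]'(by omega) = a := by rw [← hja, List.getElem_take]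
      rw [← heq]
      exact hbelow j (by omega) (by omega)
    have hdrop : ∀ b ∈ s.drop k0, 0 ≤ b := by
      intro b hb
      obtain ⟨j, hj, hjb⟩ := List.mem_iff_getElem.mp hb
      have hjlt : j < s.length - k0 := by
        have := List.length_drop (i := k0) (l := s); omega
      have heq : s[k0 + j]'(by omega) = b := by rw [← hjb, List.getElem_drop]
      rw [← heq]
      exact habove (k0 + j) (by omega) (by omega)
    rw [List.append_assoc, List.pairwise_append]
    refine ⟨hpairs.sublist (List.take_sublist _ _), ?_, ?_⟩
    · rw [List.pairwise_append]
      refine ⟨List.pairwise_replicate.mpr (Or.inr le_rfl), hpairs.sublist (List.drop_sublist _ _), ?_⟩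
      intro a ha b hb
      rw [List.eq_of_mem_replicate ha]
      exact hdrop b hb
    · intro a ha b hb
      rcases List.mem_append.mp hb with hb | hb
      · rw [List.eq_of_mem_replicate hb]
        exact (htake a ha).le
      · exact (htake a ha).le.trans (hdrop b hb)
  · -- permutation
    refine (PySem.List.sorted_perm _ _ _).trans (hperm.trans ?_)
    rw [← hzc]
    refine (hsp.symm.append_right _).trans ?_
    have h1 : s ++ List.replicate zN 0 = (s.take k0 ++ s.drop k0) ++ List.replicate zN 0 := by
      rw [List.take_append_drop]
    rw [h1, List.append_assoc, List.append_assoc]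
    exact List.Perm.append_left _ (List.perm_append_comm)

-- indexing the spliced list is B's pick
theorem pv_pick (s : List Int) (hp : List.Pairwise (· ≤ ·) s) (zN : Nat) (z : Int) (hz : z = (zN : Int)) (i : Int)
    (h0 : 0 ≤ i) (hlt : i < (s.length : Int) + zN) :
    PySem.List.pyGetD (s.take (PySem.List.bisectLeft s 0) ++ List.replicate zN 0 ++ s.drop (PySem.List.bisectLeft s 0)) i 0
      = (if i < (PySem.List.bisectLeft s 0 : Int) then PySem.List.pyGetD s i 0
         else if i < (PySem.List.bisectLeft s 0 : Int) + z then 0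
         else PySem.List.pyGetD s (i - z) 0) := by
  subst hz
  obtain ⟨hk0, hbelow, habove⟩ := PySem.List.bisectLeft_spec s 0 hp
  set k0 := PySem.List.bisectLeft s 0 with hk0def
  have hltake : (s.take k0).length = k0 := by
    rw [List.length_take]; omega
  have hlenE : (s.take k0 ++ List.replicate zN 0 ++ s.drop k0).length = s.length + zN := by
    simp [hltake, List.length_drop]; omega
  have hiE : i < ((s.take k0 ++ List.replicate zN 0 ++ s.drop k0).length : Int) := by
    rw [hlenE]; push_cast; omega
  rw [PySem.List.pyGetD_eq_getElem _ _ h0 hiE]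
  by_cases h1 : i < (k0 : Int)
  · rw [if_pos h1]
    have hj : i.toNat < (s.take k0 ++ List.replicate zN 0).length := by
      simp [hltake]; omega
    have hjs : i.toNat < s.length := by omega
    rw [List.getElem_append_left hj, List.getElem_append_left (by rw [hltake]; omega),
        List.getElem_take, PySem.List.pyGetD_eq_getElem _ _ h0 (by omega)]
  · rw [if_neg h1]
    by_cases h2 : i < (k0 : Int) + zN
    · rw [if_pos h2]
      have hj : i.toNat < (s.take k0 ++ List.replicate zN 0).length := by
        simp [hltake]; omega
      rw [List.getElem_append_left hj, List.getElem_append_right (by rw [hltake]; omega),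
          List.getElem_replicate]
    · rw [if_neg h2]
      have hge : (s.take k0 ++ List.replicate zN 0).length ≤ i.toNat := by
        simp [hltake]; omega
      rw [List.getElem_append_right hge, List.getElem_drop,
          PySem.List.pyGetD_eq_getElem _ _ (by omega) (by omega)]
      congr 1
      simp only [List.length_append, hltake, List.length_replicate]
      omega

theorem pv_stats_eq (cd : List (String × List (String × Int))) (k : String) (hcd : cd ≠ []) :
    pvValA cd k = pvStatsB ((PySem.Dict.ofList cd).size) (pvPresent cd k) := by
  -- shared abbreviations
  have hvslen : (pvVs cd).length = (PySem.Dict.ofList cd).size := by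
    simp [pvVs, PySem.Dict.values, PySem.Dict.size]
  have hvsne : pvVs cd ≠ [] := by
    have hkeys : (PySem.Dict.ofList cd).keys = PySem.Set.ofList (cd.map Prod.fst) := by
      show (cd.foldl (fun d p => d.insert p.1 p.2) PySem.Dict.empty).keys = _
      rw [PySem.Dict.keys_foldl_insert_key (key := Prod.fst) (f := fun _ p => p.2)]
      rfl
    obtain ⟨p, t, rfl⟩ := List.exists_cons_of_ne_nil hcd
    intro hnil
    have h0 : (pvVs (p :: t)).length = 0 := by rw [hnil]; rfl
    rw [hvslen] at h0
    have hsz : (PySem.Dict.ofList (p :: t)).size = (PySem.Dict.ofList (p :: t)).keys.length := by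
      simp [PySem.Dict.size, PySem.Dict.keys]
    rw [hsz, hkeys] at h0
    have : p.1 ∈ PySem.Set.ofList ((p :: t).map Prod.fst) := by
      rw [PySem.Set.mem_ofList]
      simp
    rw [List.length_eq_zero_iff.mp h0] at this
    simp at this
  have hfne : pvFull cd k ≠ [] := by
    simp only [pvFull, Ne, List.map_eq_nil_iff]
    exact hvsne
  obtain ⟨hperm, hlen⟩ := pv_full_perm (pvVs cd) k
  have hpreslen : (pvPresent cd k).length
      = ((pvVs cd).flatMap (fun sd => ((PySem.Dict.ofList sd).get? k).toList)).length := rfl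
  set s := PySem.List.sorted (pvPresent cd k) (fun x => x) false with hs
  have hslen : s.length = (pvPresent cd k).length := (PySem.List.sorted_perm _ _ _).length_eq
  have hpairs : List.Pairwise (· ≤ ·) s := PySem.List.sorted_pairwise _ _
  set zN := (pvVs cd).length - (pvPresent cd k).length with hzN
  have hvallen : (PySem.List.sorted (pvFull cd k) (fun x => x) false).length = s.length + zN := by
    have h1 : (PySem.List.sorted (pvFull cd k) (fun x => x) false).length = (pvFull cd k).length :=
      (PySem.List.sorted_perm _ _ _).length_eq
    have h2 : (pvFull cd k).length = (pvVs cd).length := by simp [pvFull]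
    omega
  have hn : ((PySem.List.sorted (pvFull cd k) (fun x => x) false).length : Int)
      = ((PySem.Dict.ofList cd).size : Int) := by
    rw [hvallen]
    push_cast
    omega
  have hnpos : 0 < (PySem.Dict.ofList cd).size := by
    have : (pvVs cd).length ≠ 0 := fun h => hvsne (List.length_eq_zero_iff.mp h)
    omega
  set nI : Int := ((PySem.Dict.ofList cd).size : Int) with hnI
  have hz : nI - (s.length : Int) = (zN : Int) := by
    rw [hnI]
    omega
  have hnsum : nI = (s.length : Int) + (zN : Int) := by omega
  -- index bounds
  have hb1 : 0 ≤ PySem.Int.floordiv nI 4 ∧ PySem.Int.floordiv nI 4 < nI := by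
    rw [PySem.Int.floordiv_eq_ediv_of_pos (by norm_num)]
    omega
  have hb2 : 0 ≤ PySem.Int.floordiv nI 2 ∧ PySem.Int.floordiv nI 2 < nI := by
    rw [PySem.Int.floordiv_eq_ediv_of_pos (by norm_num)]
    omega
  have hb3 : 0 ≤ PySem.Int.floordiv (nI * 3) 4 ∧ PySem.Int.floordiv (nI * 3) 4 < nI := by
    rw [PySem.Int.floordiv_eq_ediv_of_pos (by norm_num)]
    omega
  have hvne : PySem.List.sorted (pvFull cd k) (fun x => x) false ≠ [] := by
    rw [Ne, PySem.List.sorted_eq_nil_iff]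
    exact hfne
  simp only [pvValA, pvStatsB]
  rw [pv_min_sorted _ hfne, pv_max_sorted _ hfne, pv_pyGetD_neg_one_eq _ hvne, hn,
      pv_sorted_full cd k, ← hzN, ← hs]
  rw [pv_pick s hpairs zN (nI - (s.length : Int)) hz 0 le_rfl (by omega),
      pv_pick s hpairs zN (nI - (s.length : Int)) hz (PySem.Int.floordiv nI 4) hb1.1 (by omega),
      pv_pick s hpairs zN (nI - (s.length : Int)) hz (PySem.Int.floordiv nI 2) hb2.1 (by omega),
      pv_pick s hpairs zN (nI - (s.length : Int)) hz (PySem.Int.floordiv (nI * 3) 4) hb3.1 (by omega),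
      pv_pick s hpairs zN (nI - (s.length : Int)) hz (nI - 1) (by omega) (by omega)]

theorem pv_portA_eq (content_dict : List (String × List (String × Int))) (unique_bases : List String) :
    get_dinucleotide_content_summary content_dict unique_bases
      = (PySem.Set.ofList (pvDinucs unique_bases)).map (fun k => (k, pvValA content_dict k)) := by
  show ((pvDinucs unique_bases).foldl (fun s d => s.insert d (pvValA content_dict d)) PySem.Dict.empty).items = _
  exact pv_items_foldl_insert _ _

theorem pv_portB_eq (content_dict : List (String × List (String × Int))) (unique_bases : List String) :
    get_dinucleotide_content_summary_alt content_dict unique_bases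
      = (PySem.Set.ofList (pvDinucs unique_bases)).map
          (fun k => (k, pvStatsB ((PySem.Dict.ofList content_dict).size) (pvPresent content_dict k))) := by
  have hKeq : ((pvDinucs unique_bases).foldl (fun c d => c.insert d ([] : List Int)) PySem.Dict.empty).keys
      = PySem.Set.ofList (pvDinucs unique_bases) := by
    rw [PySem.Dict.keys_foldl_insert (f := fun _ _ => ([] : List Int))]
    rfl
  show (((content_dict.foldl (fun d p => d.insert p.1 p.2) PySem.Dict.empty).values.foldl (fun cols sd => (PySem.Dict.ofList sd).items.foldl (fun c p => if c.contains p.1 then c.modify p.1 [] (fun l => l ++ [p.2]) else c) cols) ((pvDinucs unique_bases).foldl (fun c d => c.insert d ([] : List Int)) PySem.Dict.empty)).items.foldl (fun su p => su.insert p.1 (pvStatsB ((PySem.Dict.ofList content_dict).size) p.2)) PySem.Dict.empty).items = _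
  have hofl : (content_dict.foldl (fun d p => d.insert p.1 p.2) PySem.Dict.empty) = PySem.Dict.ofList content_dict := rfl
  rw [hofl]
  set c0 := (pvDinucs unique_bases).foldl (fun c d => c.insert d ([] : List Int)) PySem.Dict.empty with hc0
  set cols := ((PySem.Dict.ofList content_dict).values).foldl (fun cols sd =>
      (PySem.Dict.ofList sd).items.foldl (fun c p =>
        if c.contains p.1 then c.modify p.1 [] (fun l => l ++ [p.2]) else c) cols) c0 with hcols
  have hckeys : cols.keys = PySem.Set.ofList (pvDinucs unique_bases) := by
    rw [hcols, pv_columns_keys, hKeq]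
  have hnd : cols.keys.Nodup := by
    rw [hckeys]
    exact PySem.Set.nodup_ofList _
  rw [PySem.Dict.items_eq_map_keys cols hnd [], List.foldl_map,
      pv_items_foldl_insert cols.keys
        (fun k => pvStatsB ((PySem.Dict.ofList content_dict).size) (cols.getD k [])),
      hckeys, pv_ofList_nodup _ (PySem.Set.nodup_ofList _)]
  apply List.map_congr_left
  intro k hk
  have hmem : c0.contains k = true := by
    rw [PySem.Dict.contains_iff_mem_keys, hKeq]
    exact hk
  have hgd : cols.getD k [] = pvPresent content_dict k := by
    rw [hcols, pv_columns_getD _ _ _ hmem, hc0,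
        pv_getD_foldl_insert _ (fun _ => ([] : List Int))]
    have h0 : (if k ∈ pvDinucs unique_bases then ([] : List Int) else PySem.Dict.empty.getD k []) = [] := by
      split <;> simp
    rw [h0]
    rfl
  rw [hgd]

-- ===== VERDICT (by name: the statement is the Claim_ definition above) =====
theorem get_dinucleotide_content_summary_spec : Claim_equal_get_dinucleotide_content_summary := by
  intro content_dict unique_bases _ hpre
  unfold Spec_get_dinucleotide_content_summary
  rw [pv_portA_eq, pv_portB_eq]
  apply List.map_congr_left
  intro k hk
  have hkdn : k ∈ pvDinucs unique_bases := (PySem.Set.mem_ofList _ _).mp hk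
  have hub : unique_bases ≠ [] := by rintro rfl; simp [pvDinucs] at hkdn
  have hcd : content_dict ≠ [] := hpre.resolve_left hub
  exact congrArg _ (pv_stats_eq content_dict k hcd)
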